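-- pv_equiv track=rewrite | github.com/Semeriuss/A2SV-Labs | contest_problems/leet_code_4/decodeSlantedCipherText.py | decodeSlantedCipher
-- ===== SOURCE A (Python) =====
-- def decodeSlantedCipher(s, rows):
--     cols = len(s)//rows
--     table = []
--     sub = 0
--
--     if cols == 0:
--         return s
--     for i in range(0, len(s), cols):
--         table.append(list(s[i : i + cols]))
--         sub = sub + cols
--
--     ans = []
--     for i in range(cols):
--         if table[0][i]:
--             ind = i
--             for j in range(rows):
--                 if ind < cols:
--                     ans.append(table[j][ind])
--                     ind += 1
--                 else:
--                     break
--     return "".join(ans).rstrip()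
-- ===== SOURCE B (Python) =====
-- def decodeSlantedCipher(s, rows):
--     cols = len(s) // rows
--     if cols == 0:
--         return s
--     buckets = [[] for _ in range(cols)]
--     for j in range(rows):
--         for i in range(cols - j):
--             buckets[i].append(s[j * cols + i + j])
--     return "".join("".join(b) for b in buckets).rstrip()
-- ===== Notes on version B (the rewrite author's own statement) =====
-- stated objective: simpler
-- what changed: A builds a 2D table by slicing and walks each diagonal with a mutable index and a break; B drops the table entirely and fills one bucket per diagonal with direct flat-index arithmetic (s[j*cols+i+j]) in a row-major nested loop, then joins the buckets.
import Mathlib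
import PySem

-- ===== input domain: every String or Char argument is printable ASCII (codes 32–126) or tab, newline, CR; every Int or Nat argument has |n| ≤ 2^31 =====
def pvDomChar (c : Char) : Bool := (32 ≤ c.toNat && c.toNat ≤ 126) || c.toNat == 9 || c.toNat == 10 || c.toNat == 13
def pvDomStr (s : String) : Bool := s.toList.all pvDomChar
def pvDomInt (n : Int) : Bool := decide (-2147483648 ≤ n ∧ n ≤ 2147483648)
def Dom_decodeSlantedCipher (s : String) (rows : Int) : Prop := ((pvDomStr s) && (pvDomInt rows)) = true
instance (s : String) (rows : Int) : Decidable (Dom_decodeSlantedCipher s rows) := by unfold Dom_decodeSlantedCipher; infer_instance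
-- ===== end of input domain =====

-- B replaces A's prebuilt 2D table and stateful diagonal walk (mutable ind + break) by direct
-- flat-index arithmetic: per-diagonal buckets filled by a row-major nested loop.  Objective: simpler.

-- ===== PORT A =====
-- Inner loop 'for j in range(rows): if ind < cols: ans.append(table[j][ind]); ind += 1 else: break'.
-- A table entry is Python's one-character string list(s[i:i+cols])[k], modelled as List Char, so
-- the truthiness test 'if table[0][i]:' is a nonemptiness test.
def decodeInnerA (table : List (List (List Char))) (cols : Int)
    (js : List Int) (ind : Int) (ans : List (List Char)) : List (List Char) × Int :=
  match js with
  | [] => (ans, ind)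
  | _j :: rest =>
      if ind < cols then
        decodeInnerA table cols rest (ind + 1)
          (ans ++ [PySem.List.pyGetD (PySem.List.pyGetD table _j []) ind []])
      else (ans, ind)   -- break

def decodeSlantedCipher (s : String) (rows : Int) : String :=
  let cs := s.toList
  let cols : Int := PySem.Int.floordiv (PySem.Str.len s) rows
  -- (the Python variable 'sub' is written but never read; omitted)
  if cols == 0 then s
  else
    let table : List (List (List Char)) :=
      (PySem.List.pyRange 0 (PySem.Str.len s) cols).foldl
        (fun t i => t ++ [(PySem.List.slice cs (some i) (some (i + cols))).map (fun c => [c])]) []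
    let ans : List (List Char) :=
      (PySem.List.pyRange 0 cols 1).foldl
        (fun ans i =>
          if PySem.List.pyGetD (PySem.List.pyGetD table 0 []) i [] ≠ [] then
            (decodeInnerA table cols (PySem.List.pyRange 0 rows 1) i ans).1
          else ans) []
    String.ofList (PySem.Chars.rstrip (PySem.Chars.join [] ans))

-- ===== PORT B =====
def decodeSlantedCipher_alt (s : String) (rows : Int) : String :=
  let cs := s.toList
  let cols : Int := PySem.Int.floordiv (PySem.Str.len s) rows
  if cols == 0 then s
  else
    let buckets0 : List (List Char) := (PySem.List.pyRange 0 cols 1).map (fun _ => [])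
    let buckets :=
      (PySem.List.pyRange 0 rows 1).foldl
        (fun bs j =>
          (PySem.List.pyRange 0 (cols - j) 1).foldl
            (fun bs i =>
              PySem.List.pySetD bs i
                (PySem.List.pyGetD bs i [] ++ [PySem.List.pyGetD cs (j * cols + i + j) ' ']))
            bs)
        buckets0
    -- '"".join("".join(b) for b in buckets)': each bucket is a list of chars, so the inner join
    -- is the bucket itself and the outer join concatenates the buckets.
    String.ofList (PySem.Chars.rstrip (PySem.Chars.join [] buckets))

-- ===== PRECONDITION & SPEC =====
-- Pre_ excludes only rows = 0, where A raises ZeroDivisionError (len(s)//rows).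
def Pre_decodeSlantedCipher (s : String) (rows : Int) : Prop := rows ≠ 0
instance (s : String) (rows : Int) : Decidable (Pre_decodeSlantedCipher s rows) := by unfold Pre_decodeSlantedCipher; infer_instance
def pvWitness_decodeSlantedCipher : String × Int := ("ch   ie   pr", 3)

def Spec_decodeSlantedCipher (s : String) (rows : Int) (out : String) : Prop := out = decodeSlantedCipher_alt s rows
instance (s : String) (rows : Int) (out : String) : Decidable (Spec_decodeSlantedCipher s rows out) := by unfold Spec_decodeSlantedCipher; infer_instance

-- ===== CLAIM (what is proved, stated in full; the proofs are below) =====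
def Claim_equal_decodeSlantedCipher : Prop := ∀ (s : String) (rows : Int), Dom_decodeSlantedCipher s rows → Pre_decodeSlantedCipher s rows → Spec_decodeSlantedCipher s rows (decodeSlantedCipher s rows)

-- ===== LEMMAS AND PROOFS =====

-- Diagonal i of the C-wide reading grid, read downward: its p-th character is cs[p*C + i + p].
def pvDiag (cs : List Char) (C R i : Nat) : List Char :=
  (List.range (min R (C - i))).map (fun p => cs.getD (p * C + i + p) ' ')

-- A's table term, with length and cols written as casts
def pvTable (cs : List Char) (C : Nat) : List (List (List Char)) :=
  (PySem.List.pyRange 0 (cs.length : Int) (C : Int)).foldl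
    (fun t i => t ++ [(PySem.List.slice cs (some i) (some (i + (C : Int)))).map (fun c => [c])]) []

theorem pv_join_nil (l : List (List Char)) : PySem.Chars.join [] l = l.flatten := by
  induction l with
  | nil => rfl
  | cons a t ih =>
    cases t with
    | nil => simp [PySem.Chars.join, List.intercalate]
    | cons b t2 =>
      rw [PySem.Chars.join_cons_cons, ih]
      simp

theorem pv_set_map_range {β : Type} (h : Nat → β) (C i : Nat) (v : β) :
    ((List.range C).map h).set i v
      = (List.range C).map (fun x => if x = i then v else h x) := by
  apply List.ext_getElem
  · simp
  · intro k h1 h2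
    simp only [List.getElem_set, List.getElem_map, List.getElem_range]
    split_ifs with e1 e2 e3 <;> first | rfl | omega

theorem pv_sing_flat (l : List Char) : (l.map (fun c => [c])).flatten = l := by
  induction l with
  | nil => rfl
  | cons a t ih => simp [ih]

theorem pv_flatMap_sing (f : Nat → List Char) (l : List Nat) :
    (l.flatMap (fun x => (f x).map (fun c => [c]))).flatten = (l.map f).flatten := by
  induction l with
  | nil => rfl
  | cons a t ih => simp_all [List.flatMap_cons, pv_sing_flat]

-- ---- A side ----

theorem pv_table_row (cs : List Char) (C R j : Nat) (hC : 0 < C)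
    (hn : R * C ≤ cs.length) (hj : j < R) :
    PySem.List.pyGetD (pvTable cs C) (j : Int) []
      = ((cs.drop (j * C)).take C).map (fun c => [c]) := by
  unfold pvTable
  rw [PySem.List.foldl_append_singleton_eq_map]
  rw [PySem.List.pyRange_of_pos _ _ (by exact_mod_cast hC)]
  have hn0 : 0 < cs.length := by nlinarith
  rw [if_pos (by exact_mod_cast hn0)]
  have hcast : ((cs.length : Int) - 0 + (C : Int) - 1) / (C : Int)
      = ((cs.length + C - 1) / C : Nat) := by
    rw [Int.natCast_ediv]
    congr 1
    omega
  have hL : j < (((cs.length : Int) - 0 + (C : Int) - 1) / (C : Int)).toNat := by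
    rw [hcast]
    rw [Int.toNat_natCast]
    have h1 : (j + 1) * C ≤ cs.length + C - 1 := by
      have : (j + 1) * C ≤ R * C := Nat.mul_le_mul_right _ hj
      omega
    have := (Nat.le_div_iff_mul_le hC).mpr h1
    omega
  rw [List.map_map, PySem.List.pyGetD_natCast, List.getD_eq_getElem?_getD]
  simp only [List.nil_append, List.getElem?_map, List.getElem?_range hL,
    Option.map_some, Option.getD_some, Function.comp]
  have : (0 : Int) + (C : Int) * (j : Int) = ((j * C : Nat) : Int) := by push_cast; ring
  rw [this, PySem.List.slice_natCast_add]

theorem pv_table_entry (cs : List Char) (C R j i' : Nat) (hC : 0 < C)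
    (hn : R * C ≤ cs.length) (hj : j < R) (hi' : i' < C) :
    PySem.List.pyGetD (PySem.List.pyGetD (pvTable cs C) (j : Int) []) (i' : Int) []
      = [cs.getD (j * C + i') ' '] := by
  rw [pv_table_row cs C R j hC hn hj, PySem.List.pyGetD_natCast]
  have hidx : j * C + i' < cs.length := by
    have : (j + 1) * C ≤ R * C := Nat.mul_le_mul_right _ hj
    nlinarith
  have hlen : i' < ((cs.drop (j * C)).take C).length := by
    simp [List.length_take, List.length_drop]
    omega
  rw [List.getD_eq_getElem?_getD, List.getElem?_map, List.getElem?_eq_getElem hlen]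
  simp only [Option.map_some, Option.getD_some]
  rw [List.getElem_take, List.getElem_drop]
  rw [List.getD_eq_getElem?_getD, List.getElem?_eq_getElem hidx]
  simp [Nat.add_comm]

theorem pv_innerA (cs : List Char) (C R : Nat) (hC : 0 < C) (hn : R * C ≤ cs.length) :
    ∀ (d j0 i : Nat) (ans : List (List Char)), j0 ≤ R → R - j0 = d → i < C →
    (decodeInnerA (pvTable cs C) (C : Int) (PySem.List.pyRange (j0 : Int) (R : Int) 1)
        ((i : Int) + (j0 : Int)) ans).1
      = ans ++ (List.range (min R (C - i) - j0)).map
          (fun p => [cs.getD ((j0 + p) * C + i + (j0 + p)) ' ']) := by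
  intro d
  induction d with
  | zero =>
    intro j0 i ans hj0 hd hi
    have hjR : j0 = R := by omega
    rw [PySem.List.pyRange_one_eq_nil (by simp [hjR])]
    have h0 : min R (C - i) - j0 = 0 := by omega
    rw [h0]
    simp [decodeInnerA]
  | succ d ih =>
    intro j0 i ans hj0 hd hi
    have hjR : j0 < R := by omega
    rw [PySem.List.pyRange_one_cons (by exact_mod_cast hjR)]
    by_cases hcase : i + j0 < C
    · rw [decodeInnerA, if_pos (by exact_mod_cast hcase)]
      have hcast : ((j0 : Int) + 1) = ((j0 + 1 : Nat) : Int) := by push_cast; ring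
      have hind : (i : Int) + (j0 : Int) + 1 = (i : Int) + ((j0 + 1 : Nat) : Int) := by push_cast; ring
      have hentry : PySem.List.pyGetD (PySem.List.pyGetD (pvTable cs C) (j0 : Int) []) ((i : Int) + (j0 : Int)) []
          = [cs.getD (j0 * C + i + j0) ' '] := by
        have : (i : Int) + (j0 : Int) = ((i + j0 : Nat) : Int) := by push_cast; ring
        rw [this, pv_table_entry cs C R j0 (i + j0) hC hn hjR hcase]
        congr 2
        omega
      rw [hentry, hcast, hind, ih (j0+1) i _ (by omega) (by omega) hi]
      have hms : min R (C - i) - j0 = (min R (C - i) - (j0 + 1)) + 1 := by omega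
      rw [hms, List.range_succ_eq_map]
      simp only [List.map_cons, List.map_map, List.append_assoc, List.cons_append,
        List.nil_append, Nat.add_zero]
      congr 1
      congr 1
      apply List.map_congr_left
      intro p _
      simp only [Function.comp]
      have hpe : j0 + 1 + p = j0 + p.succ := by omega
      rw [hpe]
    · rw [decodeInnerA, if_neg (by exact_mod_cast hcase)]
      have : min R (C - i) - j0 = 0 := by omega
      rw [this]
      simp

theorem pv_A_ans (cs : List Char) (C R : Nat) (hC : 0 < C) (hR : 0 < R)
    (hn : R * C ≤ cs.length) :
    (PySem.List.pyRange 0 (C : Int) 1).foldl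
        (fun ans i =>
          if PySem.List.pyGetD (PySem.List.pyGetD (pvTable cs C) 0 []) i [] ≠ [] then
            (decodeInnerA (pvTable cs C) (C : Int) (PySem.List.pyRange 0 (R : Int) 1) i ans).1
          else ans) []
      = (List.range C).flatMap (fun i => (pvDiag cs C R i).map (fun c => [c])) := by
  rw [PySem.List.pyRange_zero_nat C, List.foldl_map]
  have step : ∀ (ans : List (List Char)), ∀ im ∈ List.range C,
      (if PySem.List.pyGetD (PySem.List.pyGetD (pvTable cs C) 0 []) ((im : Nat) : Int) [] ≠ [] then
          (decodeInnerA (pvTable cs C) (C : Int) (PySem.List.pyRange 0 (R : Int) 1) ((im : Nat) : Int) ans).1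
        else ans)
      = ans ++ (pvDiag cs C R im).map (fun c => [c]) := by
    intro ans im hmem
    have him : im < C := List.mem_range.mp hmem
    have hcond : PySem.List.pyGetD (PySem.List.pyGetD (pvTable cs C) 0 []) ((im : Nat) : Int) [] ≠ [] := by
      have h := pv_table_entry cs C R 0 im hC hn hR him
      simp only [Nat.cast_zero] at h
      rw [h]
      simp
    rw [if_pos hcond]
    have h2 := pv_innerA cs C R hC hn R 0 im ans (by omega) (by omega) him
    simp only [Nat.cast_zero, add_zero, Nat.sub_zero, Nat.zero_add] at h2
    rw [h2]
    unfold pvDiag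
    simp only [List.map_map]
    rfl
  rw [PySem.List.foldl_congr_mem (List.range C) _
      (fun ans im => ans ++ (pvDiag cs C R im).map (fun c => [c])) [] step]
  rw [PySem.List.foldl_append_eq_flatMap]
  simp

-- ---- B side ----

theorem pv_B_row (cs : List Char) (C j : Nat) :
    ∀ (d i0 : Nat) (h : Nat → List Char), C - j - i0 = d →
    (PySem.List.pyRange (i0 : Int) ((C : Int) - (j : Int)) 1).foldl
        (fun bs i =>
          PySem.List.pySetD bs i
            (PySem.List.pyGetD bs i [] ++
              [PySem.List.pyGetD cs ((j : Int) * (C : Int) + i + (j : Int)) ' ']))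
        ((List.range C).map h)
      = (List.range C).map
          (fun i => h i ++ if i0 ≤ i ∧ i + j < C then [cs.getD (j * C + i + j) ' '] else []) := by
  intro d
  induction d with
  | zero =>
    intro i0 h hd
    rw [PySem.List.pyRange_one_eq_nil (by omega)]
    simp only [List.foldl_nil]
    apply List.map_congr_left
    intro x hx
    have : ¬ (i0 ≤ x ∧ x + j < C) := by omega
    simp [this]
  | succ d ih =>
    intro i0 h hd
    have hi0 : i0 + j < C := by omega
    rw [PySem.List.pyRange_one_cons (by omega)]
    simp only [List.foldl_cons]
    have hget : PySem.List.pyGetD ((List.range C).map h) (i0 : Int) [] = h i0 := by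
      rw [PySem.List.pyGetD_natCast]
      exact PySem.List.getD_map_range h C i0 [] (by omega)
    have hchar : PySem.List.pyGetD cs ((j : Int) * (C : Int) + (i0 : Int) + (j : Int)) ' '
        = cs.getD (j * C + i0 + j) ' ' := by
      have : ((j : Int) * (C : Int) + (i0 : Int) + (j : Int)) = ((j * C + i0 + j : Nat) : Int) := by
        push_cast; ring
      rw [this, PySem.List.pyGetD_natCast]
    rw [hget, hchar, PySem.List.pySetD_natCast, pv_set_map_range]
    have hstep : ((i0 : Int) + 1) = ((i0 + 1 : Nat) : Int) := by push_cast; ring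
    rw [hstep, ih (i0 + 1) _ (by omega)]
    apply List.map_congr_left
    intro x hx
    have hxC : x < C := List.mem_range.mp hx
    by_cases hxi : x = i0
    · subst hxi
      have h2 : x ≤ x ∧ x + j < C := by omega
      simp [h2]
    · have hiff : (i0 + 1 ≤ x ∧ x + j < C) = (i0 ≤ x ∧ x + j < C) := by
        apply propext; constructor <;> intro hh <;> omega
      simp only [if_neg hxi, hiff]

theorem pv_B_outer (cs : List Char) (C R : Nat) :
    ∀ (J : Nat), J ≤ R →
    (PySem.List.pyRange 0 (J : Int) 1).foldl
        (fun bs j =>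
          (PySem.List.pyRange 0 ((C : Int) - j) 1).foldl
            (fun bs i =>
              PySem.List.pySetD bs i
                (PySem.List.pyGetD bs i [] ++
                  [PySem.List.pyGetD cs (j * (C : Int) + i + j) ' ']))
            bs)
        ((List.range C).map (fun _ => []))
      = (List.range C).map (fun i => pvDiag cs C J i) := by
  intro J
  induction J with
  | zero =>
    intro _
    rw [show ((0 : Nat) : Int) = (0 : Int) from rfl, PySem.List.pyRange_one_eq_nil (le_refl 0)]
    simp only [List.foldl_nil]
    apply List.map_congr_left
    intro x _
    simp [pvDiag]
  | succ J ih =>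
    intro hJ
    have hcast : ((J + 1 : Nat) : Int) = ((J : Nat) : Int) + 1 := by push_cast; ring
    rw [hcast, PySem.List.pyRange_one_succ_right (by positivity), List.foldl_append,
        ih (by omega)]
    simp only [List.foldl_cons, List.foldl_nil]
    have hrow := pv_B_row cs C J (C - J) 0 (fun i => pvDiag cs C J i) (by omega)
    simp only [Nat.cast_zero] at hrow
    rw [hrow]
    apply List.map_congr_left
    intro x hx
    have hxC : x < C := List.mem_range.mp hx
    by_cases hcase : x + J < C
    · have h1 : (0 ≤ x ∧ x + J < C) := ⟨Nat.zero_le _, hcase⟩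
      rw [if_pos h1]
      unfold pvDiag
      have hm1 : min J (C - x) = J := by omega
      have hm2 : min (J + 1) (C - x) = J + 1 := by omega
      rw [hm1, hm2, List.range_succ, List.map_append]
      simp only [List.map_cons, List.map_nil]
    · rw [if_neg (by omega)]
      unfold pvDiag
      have hm : min J (C - x) = min (J + 1) (C - x) := by omega
      rw [hm]
      simp

-- ---- assembly ----

theorem pv_main_pos (s : String) (rows : Int) (hr : 0 < rows)
    (hc : PySem.Int.floordiv (PySem.Str.len s) rows ≠ 0) :
    decodeSlantedCipher s rows = decodeSlantedCipher_alt s rows := by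
  have hlen : (PySem.Str.len s) = ((s.toList.length : Nat) : Int) := by
    simp [String.length_toList]
  set n : Nat := s.toList.length with hn
  have hq0 : 0 ≤ PySem.Int.floordiv (PySem.Str.len s) rows := by
    rw [hlen, PySem.Int.floordiv_eq_ediv_of_pos hr]
    exact Int.ediv_nonneg (by positivity) (le_of_lt hr)
  set C : Nat := (PySem.Int.floordiv (PySem.Str.len s) rows).toNat with hCdef
  set R : Nat := rows.toNat with hRdef
  have hqC : PySem.Int.floordiv (PySem.Str.len s) rows = (C : Int) := by omega
  have hrR : rows = (R : Int) := by omega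
  have hC : 0 < C := by
    rcases Nat.eq_zero_or_pos C with h | h
    · exact absurd (by omega : PySem.Int.floordiv (PySem.Str.len s) rows = 0) hc
    · exact h
  have hR : 0 < R := by omega
  have hmul : R * C ≤ n := by
    have h1 : (C : Int) * rows ≤ PySem.Str.len s := ((PySem.Int.floordiv_eq_iff_of_pos hr).mp hqC).1
    rw [hlen, hrR] at h1
    have h2 : ((R * C : Nat) : Int) ≤ (n : Int) := by push_cast; linarith
    exact_mod_cast h2
  have hqC2 : PySem.Int.floordiv ((n : Nat) : Int) rows = (C : Int) := by
    rw [← hlen]; exact hqC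
  unfold decodeSlantedCipher decodeSlantedCipher_alt
  simp only [hlen, hqC2]
  rw [if_neg (by simp [hC.ne']), if_neg (by simp [hC.ne'])]
  -- A side
  have hA := pv_A_ans s.toList C R hC hR hmul
  unfold pvTable at hA
  rw [← hn] at hA
  rw [hrR, hA]
  -- B side
  have hB := pv_B_outer s.toList C R R (le_refl R)
  rw [PySem.List.pyRange_zero_nat C, List.map_map]
  have hB0 : ((List.range C).map ((fun (_ : Int) => ([] : List Char)) ∘ (fun k : Nat => (k : Int))))
      = (List.range C).map (fun _ => ([] : List Char)) := rfl
  rw [hB0, hB]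
  -- both sides are flattenings of the same diagonal lists
  rw [pv_join_nil, pv_join_nil, pv_flatMap_sing]

theorem pv_main_neg (s : String) (rows : Int) (hr : rows < 0)
    (hc : PySem.Int.floordiv (PySem.Str.len s) rows ≠ 0) :
    decodeSlantedCipher s rows = decodeSlantedCipher_alt s rows := by
  have hq : PySem.Int.floordiv (PySem.Str.len s) rows < 0 := by
    rcases lt_trichotomy (PySem.Int.floordiv (PySem.Str.len s) rows) 0 with h | h | h
    · exact h
    · exact absurd h hc
    · exfalso
      have hmod := PySem.Int.mod_neg_bounds (PySem.Str.len s) hr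
      have heq := PySem.Int.floordiv_mul_add_mod (PySem.Str.len s) rows
      have hlen : (0 : Int) ≤ PySem.Str.len s := by
        simp [String.length_toList]
      nlinarith
  simp only [PySem.Str.len_eq] at hq
  unfold decodeSlantedCipher decodeSlantedCipher_alt
  rw [if_neg (by simp only [beq_iff_eq]; omega), if_neg (by simp only [beq_iff_eq]; omega)]
  simp only [PySem.Str.len_eq]
  rw [PySem.List.pyRange_one_eq_nil (le_of_lt hq), PySem.List.pyRange_one_eq_nil (le_of_lt hr)]
  simp

-- ===== VERDICT (by name: the statement is the Claim_ definition above) =====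
theorem decodeSlantedCipher_spec : Claim_equal_decodeSlantedCipher := by
  intro s rows _hdom hpre
  unfold Spec_decodeSlantedCipher
  by_cases hc : PySem.Int.floordiv (PySem.Str.len s) rows = 0
  · have hc' : PySem.Int.floordiv ((s.length : Int)) rows = 0 := by simpa using hc
    unfold decodeSlantedCipher decodeSlantedCipher_alt
    simp [hc']
  · rcases lt_trichotomy rows 0 with h | h | h
    · exact pv_main_neg s rows h hc
    · exact absurd h hpre
    · exact pv_main_pos s rows h hc
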